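-- pv_equiv track=rewrite | github.com/wangweikang/StydyPython | fake.py | chance_slice
-- ===== SOURCE A (Python) =====
-- def chance_slice(result):
--     weight_sum = 0
--     segments = []
--     for ret in result:
--         weight_sum += ret[0]
--     for i in range(len(result)):
--         if i == 0:
--             segments.append((0, result[0][0]))
--         else:
--             segments.append((segments[i - 1][1], segments[i - 1][1] + result[i][0]))
--     return segments, weight_sum
-- ===== SOURCE B (Python) =====
-- def chance_slice(result):
--     segments = []
--     acc = 0
--     for ret in result:
--         segments.append((acc, acc + ret[0]))
--         acc += ret[0]
--     return segments, acc
-- ===== Notes on version B (the rewrite author's own statement) =====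
-- stated objective: simpler
-- what changed: Replaced A's two passes (a summing loop plus an indexed loop that reads cumulative bounds back out of segments[i-1][1]) with one pass threading a scalar running accumulator that yields both the segments and the total.
import Mathlib
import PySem

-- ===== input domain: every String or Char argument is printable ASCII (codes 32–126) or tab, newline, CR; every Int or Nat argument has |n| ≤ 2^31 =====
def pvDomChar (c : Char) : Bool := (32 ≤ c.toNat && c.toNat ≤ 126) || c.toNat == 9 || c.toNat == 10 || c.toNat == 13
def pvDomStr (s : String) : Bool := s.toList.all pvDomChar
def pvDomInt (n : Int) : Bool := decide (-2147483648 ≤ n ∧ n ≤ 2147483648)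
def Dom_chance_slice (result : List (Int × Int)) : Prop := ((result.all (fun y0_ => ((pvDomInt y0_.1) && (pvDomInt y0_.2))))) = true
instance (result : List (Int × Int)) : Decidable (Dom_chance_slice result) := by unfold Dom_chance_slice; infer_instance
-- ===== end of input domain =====

-- B replaces A's two passes (sum, then an indexed loop reading segments[i-1][1]) by one
-- accumulator-threaded pass; same cost, simpler state (objective: simpler).

-- ===== PORT A =====
-- indices 0 and i-1 / i are always in range in Python, so pyGetD with a default is exact here
def chance_slice (result : List (Int × Int)) : (List (Int × Int)) × Int :=
  let weight_sum := result.foldl (fun s ret => s + ret.1) 0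
  let segments := (PySem.List.pyRange 0 (result.length : Int) 1).foldl
    (fun segs i =>
      if i = 0 then
        segs ++ [((0 : Int), (PySem.List.pyGetD result 0 ((0:Int),(0:Int))).1)]
      else
        segs ++ [((PySem.List.pyGetD segs (i - 1) ((0:Int),(0:Int))).2,
                  (PySem.List.pyGetD segs (i - 1) ((0:Int),(0:Int))).2
                    + (PySem.List.pyGetD result i ((0:Int),(0:Int))).1)]) []
  (segments, weight_sum)

-- ===== PORT B =====
def chance_slice_alt (result : List (Int × Int)) : (List (Int × Int)) × Int :=
  result.foldl (fun p ret => (p.1 ++ [(p.2, p.2 + ret.1)], p.2 + ret.1)) ([], 0)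

-- ===== PRECONDITION & SPEC =====
def Spec_chance_slice (result : List (Int × Int)) (out : (List (Int × Int)) × Int) : Prop := out = chance_slice_alt result
instance (result : List (Int × Int)) (out : (List (Int × Int)) × Int) : Decidable (Spec_chance_slice result out) := by unfold Spec_chance_slice; infer_instance

-- ===== CLAIM (what is proved, stated in full; the proofs are below) =====
def Claim_equal_chance_slice : Prop := ∀ (result : List (Int × Int)), Dom_chance_slice result → Spec_chance_slice result (chance_slice result)

-- ===== LEMMAS AND PROOFS =====

-- the list of segments B builds when starting from accumulator acc
def segsOf : List (Int × Int) → Int → List (Int × Int)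
  | [], _ => []
  | r :: rs, acc => (acc, acc + r.1) :: segsOf rs (acc + r.1)

-- sum of the weights (first components)
def sumW (l : List (Int × Int)) : Int := (l.map Prod.fst).sum

theorem sumW_append_singleton (l : List (Int × Int)) (r : Int × Int) :
    sumW (l ++ [r]) = sumW l + r.1 := by
  simp [sumW]

theorem length_segsOf (l : List (Int × Int)) (acc : Int) :
    (segsOf l acc).length = l.length := by
  induction l generalizing acc with
  | nil => rfl
  | cons x xs ih => simp [segsOf, ih]

theorem segsOf_append (xs : List (Int × Int)) (r : Int × Int) (acc : Int) :
    segsOf (xs ++ [r]) acc = segsOf xs acc ++ [(acc + sumW xs, acc + sumW xs + r.1)] := by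
  induction xs generalizing acc with
  | nil => simp [segsOf, sumW]
  | cons x xs ih =>
    simp only [List.cons_append, segsOf, ih, sumW, List.map_cons, List.sum_cons]
    ring_nf

theorem altFold (l : List (Int × Int)) (segs : List (Int × Int)) (acc : Int) :
    l.foldl (fun p ret => (p.1 ++ [(p.2, p.2 + ret.1)], p.2 + ret.1)) (segs, acc)
      = (segs ++ segsOf l acc, acc + sumW l) := by
  induction l generalizing segs acc with
  | nil => simp [segsOf, sumW]
  | cons x xs ih =>
    simp only [List.foldl_cons, ih, segsOf, sumW, List.map_cons, List.sum_cons]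
    simp [add_assoc]

theorem sumFold (l : List (Int × Int)) (a : Int) :
    l.foldl (fun s ret => s + ret.1) a = a + sumW l := by
  induction l generalizing a with
  | nil => simp [sumW]
  | cons x xs ih => simp [List.foldl_cons, ih, sumW, add_assoc]

theorem aLoop (l : List (Int × Int)) (n : Nat) (hn : n ≤ l.length) :
    (PySem.List.pyRange 0 (n : Int) 1).foldl
      (fun segs i =>
        if i = 0 then
          segs ++ [((0 : Int), (PySem.List.pyGetD l 0 ((0:Int),(0:Int))).1)]
        else
          segs ++ [((PySem.List.pyGetD segs (i - 1) ((0:Int),(0:Int))).2,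
                    (PySem.List.pyGetD segs (i - 1) ((0:Int),(0:Int))).2
                      + (PySem.List.pyGetD l i ((0:Int),(0:Int))).1)]) []
      = segsOf (l.take n) 0 := by
  induction n with
  | zero => simp [PySem.List.pyRange_one_eq_nil, segsOf]
  | succ m ih =>
    have hm : m ≤ l.length := Nat.le_of_succ_le hn
    have hmlt : m < l.length := hn
    have hsplit : PySem.List.pyRange 0 ((m + 1 : Nat) : Int) 1
        = PySem.List.pyRange 0 (m : Int) 1 ++ [(m : Int)] := by
      push_cast
      exact PySem.List.pyRange_one_succ_right (by positivity)
    rw [hsplit, List.foldl_append, ih hm]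
    have htake : l.take (m + 1) = l.take m ++ [l[m]] := by
      rw [List.take_add_one]
      simp [List.getElem?_eq_getElem hmlt]
    cases m with
    | zero =>
      simp only [List.foldl_cons, List.foldl_nil]
      obtain ⟨r, rs, rfl⟩ : ∃ r rs, l = r :: rs := by
        cases l with
        | nil => simp at hmlt
        | cons r rs => exact ⟨r, rs, rfl⟩
      simp [segsOf, PySem.List.pyGetD_zero_cons]
    | succ k =>
      have hkl : k < l.length := by omega
      have hk1l : k + 1 < l.length := hmlt
      have htakek : l.take (k + 1) = l.take k ++ [l[k]] := by
        rw [List.take_add_one]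
        simp [List.getElem?_eq_getElem hkl]
      rw [htake, htakek]
      simp only [segsOf_append, sumW_append_singleton, List.foldl_cons, List.foldl_nil]
      have hne : ((k + 1 : Nat) : Int) ≠ 0 := by positivity
      rw [if_neg hne]
      have hidx : ((k + 1 : Nat) : Int) - 1 = ((k : Nat) : Int) := by push_cast; ring
      have hlen : (segsOf (l.take k) 0).length = k := by
        rw [length_segsOf, List.length_take]; omega
      have hget : PySem.List.pyGetD
          (segsOf (l.take k) 0 ++ [((0:Int) + sumW (l.take k), (0:Int) + sumW (l.take k) + (l[k]).1)])
          (((k + 1 : Nat) : Int) - 1) ((0:Int),(0:Int))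
          = ((0:Int) + sumW (l.take k), (0:Int) + sumW (l.take k) + (l[k]).1) := by
        rw [hidx, PySem.List.pyGetD_natCast]
        simp [List.getD, hlen]
      rw [hget]
      have hgetl : PySem.List.pyGetD l ((k + 1 : Nat) : Int) ((0:Int),(0:Int)) = l[k+1] := by
        rw [PySem.List.pyGetD_natCast]
        simp [List.getD, List.getElem?_eq_getElem hk1l]
      rw [hgetl]
      simp [add_assoc]

-- ===== VERDICT (by name: the statement is the Claim_ definition above) =====
theorem chance_slice_spec : Claim_equal_chance_slice := by
  intro result _
  unfold Spec_chance_slice chance_slice chance_slice_alt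
  rw [altFold, aLoop result result.length le_rfl, sumFold]
  simp
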